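-- pv_equiv track=rewrite | github.com/niceTryG/senior-project-final | app/routes/product_routes.py | _locate_cols
-- ===== SOURCE A (Python) =====
-- def _locate_cols(row_strs, keys_map):
--     out = {}
--     for key, needles in keys_map.items():
--         idx = None
--         for i, v in enumerate(row_strs):
--             if any(n in v for n in needles):
--                 idx = i
--                 break
--         out[key] = idx
--     return out
-- ===== SOURCE B (Python) =====
-- def _locate_cols(row_strs, keys_map):
--     out = {key: None for key in keys_map}
--     remaining = list(keys_map)
--     for i, v in enumerate(row_strs):
--         still = []
--         for key in remaining:
--             if any(n in v for n in keys_map[key]):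
--                 out[key] = i
--             else:
--                 still.append(key)
--         remaining = still
--         if not remaining:
--             break
--     return out
-- ===== Notes on version B (the rewrite author's own statement) =====
-- stated objective: alternative
-- what changed: A scans the columns from the start once per key; B makes a single sweep over the columns, maintaining the set of still-unassigned keys (pre-populated with None in key order) and breaking early once every key is assigned.
import Mathlib
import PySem

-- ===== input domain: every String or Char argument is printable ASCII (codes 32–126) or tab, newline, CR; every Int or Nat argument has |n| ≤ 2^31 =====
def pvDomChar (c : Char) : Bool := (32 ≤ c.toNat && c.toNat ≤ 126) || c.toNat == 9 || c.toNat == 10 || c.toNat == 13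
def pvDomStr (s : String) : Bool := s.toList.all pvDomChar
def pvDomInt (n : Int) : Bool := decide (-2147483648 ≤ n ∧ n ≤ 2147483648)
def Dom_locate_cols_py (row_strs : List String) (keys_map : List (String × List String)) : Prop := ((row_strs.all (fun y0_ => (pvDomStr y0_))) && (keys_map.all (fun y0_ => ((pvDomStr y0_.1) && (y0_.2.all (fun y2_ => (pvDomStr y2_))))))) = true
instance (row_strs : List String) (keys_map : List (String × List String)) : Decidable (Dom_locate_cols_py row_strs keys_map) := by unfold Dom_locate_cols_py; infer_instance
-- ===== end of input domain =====

-- B replaces A's per-key rescan of the columns by one sweep over the columns that distributes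
-- first-match indices over the still-unassigned keys (alternative decomposition, same cost).

-- ===== PORT A =====
-- any(n in v for n in needles)
def pvHit (needles : List String) (v : String) : Bool :=
  needles.any (fun n => PySem.Str.isIn n v)

-- 'idx = None; for i, v in enumerate(row_strs): if any(...): idx = i; break'
def pvScanA (needles : List String) : List String → Int → Option Int
  | [], _ => none
  | v :: rest, i => if pvHit needles v then some i else pvScanA needles rest (i + 1)

def locate_cols_py (row_strs : List String) (keys_map : List (String × List String)) : List (String × Option Int) :=
  -- keys_map is a Python dict: iterate its items (PySem.Dict.ofList), 'out[key] = idx' per key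
  ((PySem.Dict.ofList keys_map).items.foldl
      (fun out kn => out.insert kn.1 (pvScanA kn.2 row_strs 0))
      PySem.Dict.empty).items

-- ===== PORT B =====
-- 'for i, v in enumerate(row_strs):' with the inner loop over 'remaining' (state: out, still),
-- and 'if not remaining: break' at the end of the body
def pvLoopB (d : PySem.Dict String (List String)) :
    List String → Int → PySem.Dict String (Option Int) → List String → PySem.Dict String (Option Int)
  | [], _, out, _ => out
  | v :: rest, i, out, remaining =>
      let s := remaining.foldl
        (fun s key =>
          if pvHit (d.getD key []) v then (s.1.insert key (some i), s.2)
          else (s.1, s.2 ++ [key]))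
        (out, ([] : List String))
      if s.2.isEmpty then s.1 else pvLoopB d rest (i + 1) s.1 s.2

def locate_cols_py_alt (row_strs : List String) (keys_map : List (String × List String)) : List (String × Option Int) :=
  let d := PySem.Dict.ofList keys_map
  -- out = {key: None for key in keys_map}; remaining = list(keys_map)
  let out0 := d.keys.foldl (fun o k => o.insert k (none : Option Int)) PySem.Dict.empty
  (pvLoopB d row_strs 0 out0 d.keys).items

-- ===== PRECONDITION & SPEC =====
def Spec_locate_cols_py (row_strs : List String) (keys_map : List (String × List String)) (out : List (String × Option Int)) : Prop := out = locate_cols_py_alt row_strs keys_map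
instance (row_strs : List String) (keys_map : List (String × List String)) (out : List (String × Option Int)) : Decidable (Spec_locate_cols_py row_strs keys_map out) := by unfold Spec_locate_cols_py; infer_instance

-- ===== CLAIM (what is proved, stated in full; the proofs are below) =====
def Claim_equal_locate_cols_py : Prop := ∀ (row_strs : List String) (keys_map : List (String × List String)), Dom_locate_cols_py row_strs keys_map → Spec_locate_cols_py row_strs keys_map (locate_cols_py row_strs keys_map)

-- ===== LEMMAS AND PROOFS =====

-- the inner key loop is two independent accumulations: the updated dict and the unresolved keys
lemma pvInner_split (d : PySem.Dict String (List String)) (v : String) (i : Int) :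
    ∀ (remaining : List String) (out : PySem.Dict String (Option Int)) (st : List String),
    remaining.foldl
      (fun s key =>
        if pvHit (d.getD key []) v then (s.1.insert key (some i), s.2)
        else (s.1, s.2 ++ [key]))
      (out, st)
    = (remaining.foldl (fun o key => if pvHit (d.getD key []) v then o.insert key (some i) else o) out,
       st ++ remaining.filter (fun key => !pvHit (d.getD key []) v)) := by
  intro remaining
  induction remaining with
  | nil => intro out st; simp
  | cons key rest ih =>
    intro out st
    by_cases h : pvHit (d.getD key []) v <;>
      simp [List.foldl_cons, h, ih]

-- items of the dict component of the inner loop: hit keys of 'remaining' are set to column i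
lemma pvInner_items (d : PySem.Dict String (List String)) (v : String) (i : Int) :
    ∀ (remaining : List String) (o : PySem.Dict String (Option Int)),
    (∀ k ∈ remaining, o.contains k = true) →
    (remaining.foldl (fun o key => if pvHit (d.getD key []) v then o.insert key (some i) else o) o).items
      = o.items.map (fun p => if p.1 ∈ remaining ∧ pvHit (d.getD p.1 []) v = true then (p.1, some i) else p) := by
  intro remaining
  induction remaining with
  | nil => intro o _; simp
  | cons key rest ih =>
    intro o h
    by_cases hk : pvHit (d.getD key []) v
    · have hc : o.contains key = true := h key (by simp)
      have h' : ∀ k ∈ rest, (o.insert key (some i)).contains k = true := by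
        intro k hkr
        rw [PySem.Dict.contains_insert]
        simp [h k (by simp [hkr])]
      rw [List.foldl_cons, if_pos hk, ih _ h',
          PySem.Dict.items_insert_of_contains o (some i) hc, List.map_map]
      apply List.map_congr_left
      intro p _
      by_cases hp : p.1 = key
      · simp [Function.comp, hp, hk]
      · simp only [Function.comp]
        have : (p.1 == key) = false := by simp [hp]
        simp [this, hp, List.mem_cons]
    · rw [List.foldl_cons, if_neg hk, ih _ (fun k hk' => h k (by simp [hk']))]
      apply List.map_congr_left
      intro p _
      by_cases hp : p.1 = key
      · simp [hp, hk]
      · simp [hp, List.mem_cons]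

-- the inner loop never adds or removes keys
lemma pvInner_contains (d : PySem.Dict String (List String)) (v : String) (i : Int)
    (remaining : List String) (o : PySem.Dict String (Option Int))
    (h : ∀ k ∈ remaining, o.contains k = true) (k : String) :
    (remaining.foldl (fun o key => if pvHit (d.getD key []) v then o.insert key (some i) else o) o).contains k = o.contains k := by
  rw [PySem.Dict.contains_eq_decide_mem_keys, PySem.Dict.contains_eq_decide_mem_keys]
  have hkeys : (remaining.foldl (fun o key => if pvHit (d.getD key []) v then o.insert key (some i) else o) o).keys = o.keys := by
    show List.map Prod.fst _ = List.map Prod.fst _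
    rw [pvInner_items d v i remaining o h, List.map_map]
    apply List.map_congr_left
    intro p _
    by_cases hc : p.1 ∈ remaining ∧ pvHit (d.getD p.1 []) v = true <;> simp [Function.comp, hc]
  rw [hkeys]

-- with no unresolved keys the column loop does nothing
lemma pvLoopB_nil_remaining (d : PySem.Dict String (List String)) (rs : List String) (i : Int)
    (out : PySem.Dict String (Option Int)) :
    pvLoopB d rs i out [] = out := by
  cases rs <;> simp [pvLoopB]

-- main invariant of B's column sweep: each unresolved key receives its first-match index (A's scan)
lemma pvLoopB_items (d : PySem.Dict String (List String)) :
    ∀ (rs : List String) (i : Int) (out : PySem.Dict String (Option Int)) (remaining : List String),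
    (∀ k ∈ remaining, out.contains k = true) →
    (pvLoopB d rs i out remaining).items
      = out.items.map (fun p =>
          if p.1 ∈ remaining then (p.1, (pvScanA (d.getD p.1 []) rs i).or p.2) else p) := by
  intro rs
  induction rs with
  | nil =>
    intro i out remaining _
    simp [pvLoopB, pvScanA]
  | cons v rest ih =>
    intro i out remaining h
    have hstep : pvLoopB d (v :: rest) i out remaining
        = pvLoopB d rest (i + 1)
            (remaining.foldl (fun o key => if pvHit (d.getD key []) v then o.insert key (some i) else o) out)
            (remaining.filter (fun key => !pvHit (d.getD key []) v)) := by
      show (let s := remaining.foldl _ (out, ([] : List String));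
            if s.2.isEmpty then s.1 else pvLoopB d rest (i + 1) s.1 s.2) = _
      rw [pvInner_split d v i remaining out []]
      by_cases he : (remaining.filter (fun key => !pvHit (d.getD key []) v)).isEmpty
      · simp only [List.nil_append]
        rw [if_pos he, List.isEmpty_iff.mp he, pvLoopB_nil_remaining]
      · simp only [List.nil_append]
        rw [if_neg he]
    rw [hstep]
    have h' : ∀ k ∈ remaining.filter (fun key => !pvHit (d.getD key []) v),
        (remaining.foldl (fun o key => if pvHit (d.getD key []) v then o.insert key (some i) else o) out).contains k = true := by
      intro k hk
      rw [pvInner_contains d v i remaining out h k]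
      exact h k (List.mem_of_mem_filter hk)
    rw [ih (i + 1) _ _ h', pvInner_items d v i remaining out h, List.map_map]
    apply List.map_congr_left
    intro p _
    by_cases hmem : p.1 ∈ remaining
    · by_cases hh : pvHit (d.getD p.1 []) v
      · have hnst : p.1 ∉ remaining.filter (fun key => !pvHit (d.getD key []) v) := by
          simp [List.mem_filter, hh]
        simp [Function.comp, hmem, hh, hnst, pvScanA]
      · have hst : p.1 ∈ remaining.filter (fun key => !pvHit (d.getD key []) v) := by
          simp [List.mem_filter, hmem, hh]
        simp [Function.comp, hmem, hh, hst, pvScanA]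
    · have hnst : p.1 ∉ remaining.filter (fun key => !pvHit (d.getD key []) v) := by
        simp [List.mem_filter]; intro hc; exact absurd hc hmem
      simp [Function.comp, hmem, hnst]

-- ===== VERDICT (by name: the statement is the Claim_ definition above) =====
theorem locate_cols_py_spec : Claim_equal_locate_cols_py := by
  intro rs km _
  unfold Spec_locate_cols_py locate_cols_py locate_cols_py_alt
  set d := PySem.Dict.ofList km with hd
  have hnd : d.keys.Nodup := PySem.Dict.nodup_keys_ofList km
  have hndfst : (d.items.map Prod.fst).Nodup := hnd
  have hA : (d.items.foldl (fun out kn => out.insert kn.1 (pvScanA kn.2 rs 0)) PySem.Dict.empty).items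
      = d.items.map (fun kn => (kn.1, pvScanA kn.2 rs 0)) := by
    rw [PySem.Dict.items_foldl_insert_fresh d.items Prod.fst (fun kn => pvScanA kn.2 rs 0) PySem.Dict.empty
          (fun a _ => PySem.Dict.contains_empty _) hndfst]
    simp [PySem.Dict.empty]
  have hkeysnd : (d.keys.map (fun k => k)).Nodup := by simpa using hnd
  have hB0 : (d.keys.foldl (fun o k => o.insert k (none : Option Int)) PySem.Dict.empty).items
      = d.keys.map (fun k => (k, (none : Option Int))) := by
    rw [PySem.Dict.items_foldl_insert_fresh d.keys (fun k => k) (fun _ => (none : Option Int)) PySem.Dict.empty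
          (fun a _ => PySem.Dict.contains_empty _) hkeysnd]
    simp [PySem.Dict.empty]
  set out0 := d.keys.foldl (fun o k => o.insert k (none : Option Int)) PySem.Dict.empty with hout0
  have hcont : ∀ k ∈ d.keys, out0.contains k = true := by
    intro k hk
    rw [PySem.Dict.contains_eq_decide_mem_keys]
    have : out0.keys = d.keys := by
      show List.map Prod.fst _ = _
      rw [hB0, List.map_map]; simp [Function.comp_def]
    rw [this]; simp [hk]
  rw [hA, pvLoopB_items d rs 0 out0 d.keys hcont, hB0, List.map_map,
      PySem.Dict.items_eq_map_keys d hnd [], List.map_map]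
  apply List.map_congr_left
  intro k hk
  simp [Function.comp, hk]
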